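-- pv_equiv track=rewrite | github.com/Nithin1729S/iste.nitk.ac.in | backend-code/cryptonite/questions.py | question1
-- ===== SOURCE A (Python) =====
-- def question1(n):
--     if(n < 0):
--         return -1
--
--     if(n == 0):
--         return 7
--
--     Tn = 7
--     if(n > 0):
--         for i in range(1, n+1):
--             Tn = Tn + i + i*i
--
--     return Tn
-- ===== SOURCE B (Python) =====
-- def question1(n):
--     if n < 0:
--         return -1
--     # 7 + sum_{i=1..n} (i + i^2) = 7 + n(n+1)/2 + n(n+1)(2n+1)/6 = 7 + n(n+1)(n+2)/3
--     return 7 + n * (n + 1) * (n + 2) // 3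
-- ===== Notes on version B (the rewrite author's own statement) =====
-- stated objective: faster
-- what changed: Replaced the O(n) accumulation loop with a closed-form cubic formula (constant plus n(n+1)(n+2)/3) computed directly.
import Mathlib
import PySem

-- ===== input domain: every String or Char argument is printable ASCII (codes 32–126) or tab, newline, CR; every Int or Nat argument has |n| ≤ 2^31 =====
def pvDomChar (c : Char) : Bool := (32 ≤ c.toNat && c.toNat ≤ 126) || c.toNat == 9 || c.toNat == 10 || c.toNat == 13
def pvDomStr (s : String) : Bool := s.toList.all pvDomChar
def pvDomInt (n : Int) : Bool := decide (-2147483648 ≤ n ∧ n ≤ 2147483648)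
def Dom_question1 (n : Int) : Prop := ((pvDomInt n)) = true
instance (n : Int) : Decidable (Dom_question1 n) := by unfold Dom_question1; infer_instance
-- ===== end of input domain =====

-- B replaces A's O(n) accumulation loop with the closed-form formula 7 + n(n+1)(n+2)/3.

-- ===== PORT A =====
def question1 (n : Int) : Int :=
  if n < 0 then -1
  else if n = 0 then 7
  else
    -- Tn = 7; for i in range(1, n+1): Tn = Tn + i + i*i
    if n > 0 then (PySem.List.pyRange 1 (n + 1) 1).foldl (fun Tn i => Tn + i + i * i) 7
    else 7

-- ===== PORT B =====
def question1_alt (n : Int) : Int :=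
  if n < 0 then -1
  else 7 + PySem.Int.floordiv (n * (n + 1) * (n + 2)) 3

-- ===== PRECONDITION & SPEC =====
def Spec_question1 (n : Int) (out : Int) : Prop := out = question1_alt n
instance (n : Int) (out : Int) : Decidable (Spec_question1 n out) := by unfold Spec_question1; infer_instance

-- ===== CLAIM (what is proved, stated in full; the proofs are below) =====
def Claim_equal_question1 : Prop := ∀ (n : Int), Dom_question1 n → Spec_question1 n (question1 n)

-- ===== LEMMAS AND PROOFS =====

-- the loop over range(1, b+1) computes 7 + b(b+1)(b+2)/3 (exact division), for 0 ≤ b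
theorem question1_loop_closed (m : Nat) :
    (PySem.List.pyRange 1 ((m : Int) + 1) 1).foldl (fun Tn i => Tn + i + i * i) 7
      = 7 + PySem.Int.floordiv ((m : Int) * ((m : Int) + 1) * ((m : Int) + 2)) 3 := by
  have key : ∀ (k : Nat) (init : Int),
      (PySem.List.pyRange 1 ((k : Int) + 1) 1).foldl (fun Tn i => Tn + i + i * i) init
        = init * 3 / 3 + PySem.Int.floordiv ((k : Int) * ((k : Int) + 1) * ((k : Int) + 2)) 3 := by
    intro k
    induction k with
    | zero =>
      intro init
      simp [PySem.List.pyRange_one_eq_nil, PySem.Int.floordiv]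
    | succ j ih =>
      intro init
      have h : (1 : Int) ≤ (j : Int) + 1 := by omega
      rw [show ((j + 1 : Nat) : Int) + 1 = ((j : Int) + 1) + 1 by push_cast; ring,
          PySem.List.pyRange_one_succ_right h, List.foldl_append]
      simp only [List.foldl]
      rw [ih]
      simp only [PySem.Int.floordiv]
      push_cast
      have hj : ((j : Int) + 1) * ((j : Int) + 1 + 1) * ((j : Int) + 1 + 2)
          = (j : Int) * ((j : Int) + 1) * ((j : Int) + 2) + (((j : Int) + 1) + ((j : Int) + 1) * ((j : Int) + 1)) * 3 := by ring
      rw [hj, Int.add_mul_fdiv_right _ _ (by norm_num : (3:Int) ≠ 0)]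
      ring
  have := key m 7
  rw [this]
  norm_num

-- ===== VERDICT (by name: the statement is the Claim_ definition above) =====
theorem question1_spec : Claim_equal_question1 := by
  intro n _
  unfold Spec_question1 question1 question1_alt
  by_cases hneg : n < 0
  · simp [hneg]
  · simp only [hneg, if_false]
    by_cases hz : n = 0
    · simp [hz, PySem.Int.floordiv]
    · have hpos : n > 0 := by omega
      simp only [hz, if_false, hpos, if_true]
      obtain ⟨m, rfl⟩ : ∃ m : Nat, n = (m : Int) := ⟨n.toNat, by omega⟩
      exact question1_loop_closed m
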